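-- pv_equiv track=rewrite | github.com/laurajuanna/PIOIX_1erCuatrimestre | categorias.py | esFull
-- ===== SOURCE A (Python) =====
-- def esFull(dados):
--     hay_tres=False
--     hay_dos=False
--     for i in range (0,len(dados)):
--         if dados.count(dados[i])==3:
--             hay_tres=True
--         if dados.count(dados[i])==2:
--            hay_dos=True
--     return hay_tres and hay_dos
-- ===== SOURCE B (Python) =====
-- def esFull(dados):
--     freq = {}
--     for x in dados:
--         freq[x] = freq.get(x, 0) + 1
--     vals = freq.values()
--     return 3 in vals and 2 in vals
-- ===== Notes on version B (the rewrite author's own statement) =====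
-- stated objective: faster
-- what changed: Replaces the index loop with repeated O(n) .count() scans by a single frequency-table build followed by two membership checks on the counts.
import Mathlib
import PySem

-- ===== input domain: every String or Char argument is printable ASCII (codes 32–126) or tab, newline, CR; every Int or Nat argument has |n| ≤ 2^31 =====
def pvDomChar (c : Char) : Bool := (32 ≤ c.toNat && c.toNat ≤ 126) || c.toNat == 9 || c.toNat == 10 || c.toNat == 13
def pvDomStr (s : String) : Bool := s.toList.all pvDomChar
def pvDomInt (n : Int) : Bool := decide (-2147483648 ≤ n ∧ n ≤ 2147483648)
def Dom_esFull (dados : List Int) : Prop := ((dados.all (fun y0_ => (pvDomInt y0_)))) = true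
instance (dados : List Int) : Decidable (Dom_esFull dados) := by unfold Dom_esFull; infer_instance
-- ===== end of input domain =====

-- B replaces A's index loop with repeated .count() scans (O(n^2)) by a single frequency-table
-- build plus membership tests on the counts (O(n)); objective: faster.

-- ===== PORT A =====
-- for i in range(0, len(dados)): two if-updates on hay_tres/hay_dos; dados[i] is always in
-- range here, so pyGetD with a default is exact.
def esFull (dados : List Int) : Bool :=
  let st := (PySem.List.pyRange 0 (PySem.List.len dados)).foldl
    (fun (s : Bool × Bool) i =>
      ((if PySem.List.count dados (PySem.List.pyGetD dados i 0) == 3 then true else s.1),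
       (if PySem.List.count dados (PySem.List.pyGetD dados i 0) == 2 then true else s.2)))
    (false, false)
  st.1 && st.2

-- ===== PORT B =====
-- freq = {}; for x in dados: freq[x] = freq.get(x, 0) + 1; return 3 in vals and 2 in vals
def esFull_alt (dados : List Int) : Bool :=
  let freq := dados.foldl (fun (d : PySem.Dict Int Int) x => d.insert x (d.getD x 0 + 1))
    PySem.Dict.empty
  let vals := freq.values
  vals.contains 3 && vals.contains 2

-- ===== PRECONDITION & SPEC =====
def Spec_esFull (dados : List Int) (out : Bool) : Prop := out = esFull_alt dados
instance (dados : List Int) (out : Bool) : Decidable (Spec_esFull dados out) := by unfold Spec_esFull; infer_instance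

-- ===== CLAIM (what is proved, stated in full; the proofs are below) =====
def Claim_equal_esFull : Prop := ∀ (dados : List Int), Dom_esFull dados → Spec_esFull dados (esFull dados)

-- ===== LEMMAS AND PROOFS =====

-- A's index loop visits exactly the elements of the list.
theorem any_pyGetD_pyRange (dados : List Int) (p : Int → Bool) :
    (PySem.List.pyRange 0 (PySem.List.len dados)).any
      (fun i => p (PySem.List.pyGetD dados i 0)) = dados.any p := by
  conv_rhs => rw [← PySem.List.map_pyGetD_pyRange_zero dados 0]
  rw [List.any_map]
  rfl

-- A's result: some element occurs exactly 3 times AND some element occurs exactly 2 times.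
theorem esFull_eq_any (dados : List Int) :
    esFull dados = (dados.any (fun x => PySem.List.count dados x == 3)
      && dados.any (fun x => PySem.List.count dados x == 2)) := by
  unfold esFull
  rw [PySem.List.foldl_prod_mk
        (f := fun t i => if PySem.List.count dados (PySem.List.pyGetD dados i 0) == 3 then true else t)
        (g := fun t i => if PySem.List.count dados (PySem.List.pyGetD dados i 0) == 2 then true else t)]
  simp only [PySem.List.foldl_if_true_eq, Bool.false_or]
  rw [any_pyGetD_pyRange dados (fun x => PySem.List.count dados x == 3),
      any_pyGetD_pyRange dados (fun x => PySem.List.count dados x == 2)]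

-- B's result: the same two existence facts, read off the counter's values.
theorem esFull_alt_eq_any (dados : List Int) :
    esFull_alt dados = (dados.any (fun x => PySem.List.count dados x == 3)
      && dados.any (fun x => PySem.List.count dados x == 2)) := by
  unfold esFull_alt
  rw [PySem.Dict.foldl_insert_getD_add_one_eq_counter]
  simp only [PySem.Dict.values, PySem.Dict.items_counter, List.map_map]
  have hv : ∀ (c : Int) (cn : Nat), c = (cn : Int) →
      ((PySem.Set.ofList dados).map
        ((fun p : Int × Int => p.2) ∘ (fun k => (k, (List.count k dados : Int))))).contains c
      = dados.any (fun x => PySem.List.count dados x == cn) := by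
    intro c cn hcn
    subst hcn
    simp only [List.contains_eq_any_beq, List.any_map, PySem.List.count_eq]
    refine Bool.eq_iff_iff.2 ?_
    simp only [List.any_eq_true, beq_iff_eq, PySem.Set.mem_ofList, Function.comp_apply, Nat.cast_inj]
    constructor
    · rintro ⟨x, hx, hc⟩; exact ⟨x, hx, hc.symm⟩
    · rintro ⟨x, hx, hc⟩; exact ⟨x, hx, hc.symm⟩
  rw [hv 3 3 (by decide), hv 2 2 (by decide)]

-- ===== VERDICT (by name: the statement is the Claim_ definition above) =====
theorem esFull_spec : Claim_equal_esFull := by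
  intro dados _
  unfold Spec_esFull
  rw [esFull_eq_any, esFull_alt_eq_any]
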